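-- pv_equiv track=rewrite | github.com/Yara-Abdallah/Life-Event-EXtraction | pronoun_resolution.py | getting_n_previous_sentences
-- ===== SOURCE A (Python) =====
-- def getting_n_previous_sentences(index_of_sentence, num_of_sentence_for_pronoun_resolution, sentences_of_dialogs,
--                                 dialog_number):
--    sentence = []
--    text = ""
--    index_of_sentence1 = index_of_sentence
--    while (index_of_sentence1 >= 0 and num_of_sentence_for_pronoun_resolution >= 0):
--        sentence.append(sentences_of_dialogs[dialog_number][index_of_sentence1])
--        index_of_sentence1 -= 1
--        num_of_sentence_for_pronoun_resolution -= 1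
--    for i in range(len(sentence)):
--        text += " " + str(sentence[len(sentence) - i - 1])
--    return text
-- ===== SOURCE B (Python) =====
-- def getting_n_previous_sentences(index_of_sentence, num_of_sentence_for_pronoun_resolution, sentences_of_dialogs,
--                                  dialog_number):
--     text = ""
--     start = max(0, index_of_sentence - num_of_sentence_for_pronoun_resolution)
--     for j in range(start, index_of_sentence + 1):
--         text += " " + str(sentences_of_dialogs[dialog_number][j])
--     return text
-- ===== Notes on version B (the rewrite author's own statement) =====
-- stated objective: simpler
-- what changed: Replaces the backward collect-into-a-list loop plus a second reverse-emitting loop by one forward loop over range(max(0, index-num), index+1) that appends directly to the string; the temporary list and the reversal disappear.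
import Mathlib
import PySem

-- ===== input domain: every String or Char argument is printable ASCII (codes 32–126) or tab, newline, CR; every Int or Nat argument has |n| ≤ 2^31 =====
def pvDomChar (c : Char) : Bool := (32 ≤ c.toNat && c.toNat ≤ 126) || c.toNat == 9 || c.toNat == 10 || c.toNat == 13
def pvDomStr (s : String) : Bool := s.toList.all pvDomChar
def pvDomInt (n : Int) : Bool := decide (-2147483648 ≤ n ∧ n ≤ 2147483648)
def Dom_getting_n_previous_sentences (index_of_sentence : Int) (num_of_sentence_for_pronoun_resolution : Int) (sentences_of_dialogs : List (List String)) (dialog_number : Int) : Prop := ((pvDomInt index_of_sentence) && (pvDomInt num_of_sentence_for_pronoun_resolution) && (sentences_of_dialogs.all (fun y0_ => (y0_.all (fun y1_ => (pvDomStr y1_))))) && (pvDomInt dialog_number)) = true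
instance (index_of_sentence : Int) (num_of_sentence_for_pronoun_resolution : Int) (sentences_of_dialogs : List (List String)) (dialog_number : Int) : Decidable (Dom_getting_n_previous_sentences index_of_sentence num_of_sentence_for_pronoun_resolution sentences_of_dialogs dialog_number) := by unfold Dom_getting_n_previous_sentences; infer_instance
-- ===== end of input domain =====

-- B replaces A's backward collect-then-reverse-emit two-pass scheme by a single forward loop
-- over range(max(0, index-num), index+1); return value only, no mutation involved.

-- ===== PORT A =====
-- the while loop: collect row[index1], row[index1-1], … while index1 ≥ 0 and num ≥ 0
def pvA_loop (row : List String) (i n : Int) (sentence : List String) : List String :=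
  if 0 ≤ i ∧ 0 ≤ n then
    pvA_loop row (i - 1) (n - 1) (sentence ++ [PySem.List.pyGetD row i ""])
  else sentence
termination_by (i + 1).toNat
decreasing_by omega

def getting_n_previous_sentences (index_of_sentence : Int) (num_of_sentence_for_pronoun_resolution : Int) (sentences_of_dialogs : List (List String)) (dialog_number : Int) : String :=
  let sentence := pvA_loop (PySem.List.pyGetD sentences_of_dialogs dialog_number [])
      index_of_sentence num_of_sentence_for_pronoun_resolution []
  -- for i in range(len(sentence)): text += " " + str(sentence[len(sentence) - i - 1])
  (PySem.List.pyRange 0 (sentence.length : Int) 1).foldl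
    (fun text i => text ++ " " ++ PySem.List.pyGetD sentence ((sentence.length : Int) - i - 1) "") ""

-- ===== PORT B =====
def getting_n_previous_sentences_alt (index_of_sentence : Int) (num_of_sentence_for_pronoun_resolution : Int) (sentences_of_dialogs : List (List String)) (dialog_number : Int) : String :=
  let start := max 0 (index_of_sentence - num_of_sentence_for_pronoun_resolution)
  (PySem.List.pyRange start (index_of_sentence + 1) 1).foldl
    (fun text j => text ++ " " ++
      PySem.List.pyGetD (PySem.List.pyGetD sentences_of_dialogs dialog_number []) j "") ""

-- ===== PRECONDITION & SPEC =====
-- Pre_ excludes exactly the inputs where Python A raises IndexError: the loop body runs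
-- (both counters nonnegative) but the dialog index or the sentence index is out of range.
def Pre_getting_n_previous_sentences (index_of_sentence : Int) (num_of_sentence_for_pronoun_resolution : Int) (sentences_of_dialogs : List (List String)) (dialog_number : Int) : Prop :=
  index_of_sentence < 0 ∨ num_of_sentence_for_pronoun_resolution < 0 ∨
    (PySem.Raise.InRange sentences_of_dialogs.length dialog_number ∧
      index_of_sentence < ((PySem.List.pyGetD sentences_of_dialogs dialog_number []).length : Int))
instance (index_of_sentence : Int) (num_of_sentence_for_pronoun_resolution : Int) (sentences_of_dialogs : List (List String)) (dialog_number : Int) : Decidable (Pre_getting_n_previous_sentences index_of_sentence num_of_sentence_for_pronoun_resolution sentences_of_dialogs dialog_number) := by unfold Pre_getting_n_previous_sentences; infer_instance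

def pvWitness_getting_n_previous_sentences : Int × Int × List (List String) × Int := (1, 1, [["a", "b"]], 0)

def Spec_getting_n_previous_sentences (index_of_sentence : Int) (num_of_sentence_for_pronoun_resolution : Int) (sentences_of_dialogs : List (List String)) (dialog_number : Int) (out : String) : Prop := out = getting_n_previous_sentences_alt index_of_sentence num_of_sentence_for_pronoun_resolution sentences_of_dialogs dialog_number
instance (index_of_sentence : Int) (num_of_sentence_for_pronoun_resolution : Int) (sentences_of_dialogs : List (List String)) (dialog_number : Int) (out : String) : Decidable (Spec_getting_n_previous_sentences index_of_sentence num_of_sentence_for_pronoun_resolution sentences_of_dialogs dialog_number out) := by unfold Spec_getting_n_previous_sentences; infer_instance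

-- ===== CLAIM (what is proved, stated in full; the proofs are below) =====
def Claim_equal_getting_n_previous_sentences : Prop := ∀ (index_of_sentence : Int) (num_of_sentence_for_pronoun_resolution : Int) (sentences_of_dialogs : List (List String)) (dialog_number : Int), Dom_getting_n_previous_sentences index_of_sentence num_of_sentence_for_pronoun_resolution sentences_of_dialogs dialog_number → Pre_getting_n_previous_sentences index_of_sentence num_of_sentence_for_pronoun_resolution sentences_of_dialogs dialog_number → Spec_getting_n_previous_sentences index_of_sentence num_of_sentence_for_pronoun_resolution sentences_of_dialogs dialog_number (getting_n_previous_sentences index_of_sentence num_of_sentence_for_pronoun_resolution sentences_of_dialogs dialog_number)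

-- ===== LEMMAS AND PROOFS =====

-- the collected list is acc followed by the reversed forward slice
theorem pvA_loop_eq (row : List String) (i n : Int) (acc : List String) :
    pvA_loop row i n acc =
      acc ++ ((PySem.List.pyRange (max 0 (i - n)) (i + 1) 1).map
        (fun j => PySem.List.pyGetD row j "")).reverse := by
  induction i, n, acc using pvA_loop.induct row with
  | case1 i n acc h ih =>
      rw [pvA_loop, if_pos h, ih]
      have h1 : max 0 (i - 1 - (n - 1)) = max 0 (i - n) := by omega
      have h2 : max 0 (i - n) ≤ i := by omega
      rw [h1, PySem.List.pyRange_one_append (max 0 (i - n)) i (i + 1) h2 (by omega),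
        PySem.List.pyRange_one_singleton]
      simp
  | case2 i n acc h =>
      rw [pvA_loop, if_neg h, PySem.List.pyRange_one_eq_nil (by omega)]
      simp

-- A's second loop reads the list back to front: it folds over the reverse
theorem emit_reverse (l : List String) :
    (PySem.List.pyRange 0 (l.length : Int) 1).foldl
        (fun text i => text ++ " " ++ PySem.List.pyGetD l ((l.length : Int) - i - 1) "") ""
      = l.reverse.foldl (fun text s => text ++ " " ++ s) "" := by
  have hlen : (l.reverse.length : Int) = (l.length : Int) := by simp
  calc (PySem.List.pyRange 0 (l.length : Int) 1).foldl
        (fun text i => text ++ " " ++ PySem.List.pyGetD l ((l.length : Int) - i - 1) "") ""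
      = (PySem.List.pyRange 0 ((l.reverse.length : Int)) 1).foldl
        (fun text i => text ++ " " ++ PySem.List.pyGetD l.reverse i "") "" := by
        rw [hlen]
        apply PySem.List.foldl_congr_mem
        intro acc i hi
        rw [PySem.List.mem_pyRange_one] at hi
        rw [PySem.List.pyGetD_eq_getElem l "" (by omega) (by omega),
            PySem.List.pyGetD_eq_getElem l.reverse "" (by omega) (by simpa using hi.2)]
        congr 1
        rw [List.getElem_reverse]
        congr 1
        omega
    _ = l.reverse.foldl (fun text s => text ++ " " ++ s) "" := by
        exact PySem.List.foldl_pyRange_zero_pyGetD' l.reverse "" _ ""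

-- ===== VERDICT (by name: the statement is the Claim_ definition above) =====
theorem getting_n_previous_sentences_spec : Claim_equal_getting_n_previous_sentences := by
  intro idx num sods dn _ _
  unfold Spec_getting_n_previous_sentences getting_n_previous_sentences getting_n_previous_sentences_alt
  rw [pvA_loop_eq, emit_reverse]
  simp [List.foldl_map]
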